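-- pv_equiv track=rewrite | github.com/tgy1201/coding-test | 프로그래머스/2/42890. 후보키/후보키.py | solution
-- ===== SOURCE A (Python) =====
-- from itertools import combinations
-- import copy
--
-- def solution(relation):
--     dd = {i: [] for i in range(len(relation[0]))}
--     cnt = 0
--     test = []
--
--     for i in relation:
--         for index, j in enumerate(i):
--             dd[index].append(j)
--
--     length = len(dd)
--     for i in range(1, length+1):
--         com = combinations(dd.keys(), i)
--         check = []
--         for j in com:
--             tup = [dd[k] for k in j]
--             row = zip(zip(*tup))
--             a = copy.deepcopy(row)
--
--             if sorted(list(a)) == sorted(list(set(row))):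
--                 test.append(j)
--                 cnt += 1
--                 check.extend(j)
--                 continue
--     sets = [set(sublist) for sublist in test]  # 리스트를 집합으로 변환
--     result = []
--
--     for s in sets:
--         if not any(s > other for other in sets):  # 다른 집합을 포함하는 경우 제외
--             result.append(list(s))  # 원래 리스트 형태로 변환해서 저장
--
--     return len(result)
--
--     return result
-- ===== SOURCE B (Python) =====
-- from itertools import combinations
--
-- def solution(relation):
--     n = len(relation[0])
--     cols = [[row[k] for row in relation if len(row) > k] for k in range(n)]
--     found = []  # minimal candidate keys, discovered in increasing size
--     for size in range(1, n + 1):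
--         for combo in combinations(range(n), size):
--             s = set(combo)
--             if any(k <= s for k in found):  # superset of a found key: prune
--                 continue
--             proj = list(zip(*(cols[k] for k in combo)))
--             if len(set(proj)) == len(proj):
--                 found.append(s)
--     return len(found)
-- ===== Notes on version B (the rewrite author's own statement) =====
-- stated objective: alternative
-- what changed: A collects every row-unique column subset (testing uniqueness via sorted-list-vs-sorted-set of the dict-built transposed columns) and afterwards filters out strict supersets; B builds the columns once with a comprehension, enumerates subsets in increasing size, prunes any subset containing an already-found key before testing, and counts the found minimal keys directly.
import Mathlib
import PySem

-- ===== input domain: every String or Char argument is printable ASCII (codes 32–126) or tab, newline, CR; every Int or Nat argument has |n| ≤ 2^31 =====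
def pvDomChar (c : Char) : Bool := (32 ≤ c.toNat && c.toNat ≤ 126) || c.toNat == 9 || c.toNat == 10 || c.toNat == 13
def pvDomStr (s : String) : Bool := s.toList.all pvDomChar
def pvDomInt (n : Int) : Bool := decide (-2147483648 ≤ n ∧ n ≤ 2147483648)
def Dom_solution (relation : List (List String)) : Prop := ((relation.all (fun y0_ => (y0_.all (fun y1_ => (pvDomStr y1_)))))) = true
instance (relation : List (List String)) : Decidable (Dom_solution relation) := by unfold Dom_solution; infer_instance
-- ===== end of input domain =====

-- B interleaves the minimality filter into a size-ascending enumeration instead of A's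
-- collect-all-unique-subsets-then-drop-strict-supersets; same return value on Pre_.

-- ===== PORT A =====
-- zip(*tup) for a list of lists: rows up to the shortest list (exact n-ary zip truncation)
def zipN (ls : List (List String)) : List (List String) :=
  match ls with
  | [] => []
  | l :: t =>
      (List.range (t.foldl (fun m x => min m x.length) l.length)).map
        (fun i => (l :: t).map (fun c => c.getD i ""))

-- dd = {i: [] for i in range(len(relation[0]))} then the two append loops of A
def buildDD (relation : List (List String)) : PySem.Dict Int (List String) :=
  let n := relation.headI.length                     -- len(relation[0]); Pre_ gives relation ≠ []
  let dd0 : PySem.Dict Int (List String) :=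
    (PySem.List.pyRange 0 (n : Int) 1).foldl
      (fun d i => d.insert i ([] : List String)) PySem.Dict.empty
  -- for i in relation: for index, j in enumerate(i): dd[index].append(j)   (KeyError excluded by Pre_)
  relation.foldl
    (fun d row =>
      (PySem.List.enumerate row 0).foldl
        (fun d p => d.modify p.1 [] (fun l => l ++ [p.2])) d) dd0

def solution (relation : List (List String)) : Int :=
  let dd := buildDD relation
  let length : Int := dd.size
  -- for i in range(1, length+1): for j in combinations(dd.keys(), i): …
  -- cnt and check are written but never read by A, so the port drops them
  let test := (PySem.List.pyRange 1 (length + 1) 1).foldl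
    (fun test i =>
      (PySem.List.combinations dd.keys i.toNat).foldl
        (fun test j =>
          let tup := j.map (fun k => dd.getD k [])
          let row := (zipN tup).map (fun r => [r])     -- zip(zip(*tup)): each row wrapped in a 1-tuple
          -- sorted(list(deepcopy(row))) == sorted(list(set(row)))
          if PySem.List.sorted row (fun x => x) false =
             PySem.List.sorted (PySem.Set.ofList row) (fun x => x) false
          then test ++ [j] else test)
        test)
    ([] : List (List Int))
  let sets := test.map (fun sub => PySem.Set.ofList sub)
  -- for s in sets: if not any(s > other for other in sets): result.append(list(s))
  -- (list(s) iterates the set; only len(result) is returned, so appending the set's own list is exact)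
  let result := sets.foldl
    (fun result s =>
      if !(sets.any (fun other =>
            PySem.Set.issuperset s other && !(PySem.Set.equal s other)))
      then result ++ [s] else result)
    ([] : List (List Int))
  (result.length : Int)

-- ===== PORT B =====
def solution_alt (relation : List (List String)) : Int :=
  let n := relation.headI.length
  -- cols = [[row[k] for row in relation if len(row) > k] for k in range(n)]
  let cols := (PySem.List.pyRange 0 (n : Int) 1).map
    (fun k => (relation.filter (fun r => decide (k < PySem.List.len r))).map
      (fun r => PySem.List.pyGetD r k ""))
  let found := (PySem.List.pyRange 1 ((n : Int) + 1) 1).foldl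
    (fun found size =>
      (PySem.List.combinations (PySem.List.pyRange 0 (n : Int) 1) size.toNat).foldl
        (fun found combo =>
          let s : PySem.Set Int := PySem.Set.ofList combo
          if found.any (fun k => PySem.Set.issubset k s) then found
          else
            -- proj = list(zip(*(cols[k] for k in combo)))
            let proj := zipN (combo.map (fun k => PySem.List.pyGetD cols k []))
            if (PySem.Set.ofList proj).length = proj.length then found ++ [s] else found)
        found)
    ([] : List (PySem.Set Int))
  (found.length : Int)

-- ===== PRECONDITION & SPEC =====
-- Pre_ excludes exactly the inputs where A raises: the empty relation (IndexError on
-- relation[0]) and relations with a row longer than the first row (KeyError in dd).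
def Pre_solution (relation : List (List String)) : Prop :=
  relation ≠ [] ∧ ∀ row ∈ relation, row.length ≤ relation.headI.length
instance (relation : List (List String)) : Decidable (Pre_solution relation) := by
  unfold Pre_solution; infer_instance

def pvWitness_solution : List (List String) := [["a", "1"], ["b", "1"], ["c", "2"]]

def Spec_solution (relation : List (List String)) (out : Int) : Prop := out = solution_alt relation
instance (relation : List (List String)) (out : Int) : Decidable (Spec_solution relation out) := by
  unfold Spec_solution; infer_instance

-- ===== CLAIM (what is proved, stated in full; the proofs are below) =====
def Claim_equal_solution : Prop := ∀ (relation : List (List String)), Dom_solution relation → Pre_solution relation → Spec_solution relation (solution relation)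


-- ===== LEMMAS AND PROOFS =====

-- column k of the relation: the k-th entry of every row long enough
def colF (relation : List (List String)) (k : Nat) : List String :=
  (relation.filter (fun r => decide (k < r.length))).map (fun r => r.getD k "")

-- the projection of the rows to a list of column indices (zip of the selected columns)
def projL (relation : List (List String)) (c : List Int) : List (List String) :=
  zipN (c.map (fun k => colF relation k.toNat))

-- all candidate index subsets, in the order both ports enumerate them
def allC (n : Nat) : List (List Int) :=
  (PySem.List.pyRange 1 ((n : Int) + 1) 1).flatMap
    (fun i => PySem.List.combinations (PySem.List.pyRange 0 (n : Int) 1) i.toNat)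

-- c is a minimal row-unique subset (relative to the enumeration list L)
def MinL (relation : List (List String)) (L : List (List Int)) (c : List Int) : Bool :=
  decide ((projL relation c).Nodup ∧
    ∀ t ∈ L, (projL relation t).Nodup → t ⊆ c → t = c)

-- the abstract step both ports reduce to
def stepP (relation : List (List String)) (f : List (List Int)) (c : List Int) : List (List Int) :=
  if f.any (fun t => decide (t ⊆ c)) then f
  else if (projL relation c).Nodup then f ++ [c] else f

-- generic: a minimal-length element of a nonempty predicate over a list
theorem minL_iff (relation : List (List String)) (L : List (List Int)) (c : List Int) :
    MinL relation L c = true ↔ ((projL relation c).Nodup ∧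
      ∀ t ∈ L, (projL relation t).Nodup → t ⊆ c → t = c) := by
  simp [MinL]

theorem exists_min_len {p : List Int → Prop} [DecidablePred p] :
    ∀ (L : List (List Int)), (∃ x ∈ L, p x) →
      ∃ x ∈ L, p x ∧ ∀ y ∈ L, p y → x.length ≤ y.length := by
  intro L
  induction L with
  | nil => rintro ⟨x, hx, -⟩; cases hx
  | cons a L ih =>
      rintro ⟨x, hx, hpx⟩
      by_cases hL : ∃ y ∈ L, p y
      · obtain ⟨m, hm, hpm, hmin⟩ := ih hL
        by_cases hpa : p a
        · rcases le_total a.length m.length with hle | hle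
          · exact ⟨a, by simp, hpa, by
              intro y hy hpy
              rcases List.mem_cons.mp hy with rfl | hy
              · exact le_refl _
              · exact hle.trans (hmin y hy hpy)⟩
          · exact ⟨m, by simp [hm], hpm, by
              intro y hy hpy
              rcases List.mem_cons.mp hy with rfl | hy
              · exact hle
              · exact hmin y hy hpy⟩
        · exact ⟨m, by simp [hm], hpm, by
            intro y hy hpy
            rcases List.mem_cons.mp hy with rfl | hy
            · exact absurd hpy hpa
            · exact hmin y hy hpy⟩
      · have hxa : x = a := by
          rcases List.mem_cons.mp hx with rfl | hx
          · rfl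
          · exact absurd ⟨x, hx, hpx⟩ hL
        subst hxa
        exact ⟨x, by simp, hpx, by
          intro y hy hpy
          rcases List.mem_cons.mp hy with rfl | hy
          · exact le_refl _
          · exact absurd ⟨y, hy, hpy⟩ hL⟩

-- strictly increasing lists: a permutation is an equality
theorem eq_of_perm_inc {l₁ l₂ : List Int} (h : l₁.Perm l₂)
    (h1 : l₁.Pairwise (· < ·)) (h2 : l₂.Pairwise (· < ·)) : l₁ = l₂ :=
  List.Perm.eq_of_pairwise (fun _ _ _ _ hab hba => absurd hba (lt_asymm hab)) h1 h2 h

theorem nodup_of_inc {l : List Int} (h : l.Pairwise (· < ·)) : l.Nodup :=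
  h.imp ne_of_lt

-- a proper subset of a strictly increasing list is strictly shorter
theorem subset_strict_length {u c : List Int} (hsub : u ⊆ c) (hne : u ≠ c)
    (hu : u.Pairwise (· < ·)) (hc : c.Pairwise (· < ·)) : u.length < c.length := by
  have hsp := List.subperm_of_subset (nodup_of_inc hu) hsub
  rcases lt_or_eq_of_le hsp.length_le with h | h
  · exact h
  · exact absurd (eq_of_perm_inc (hsp.perm_of_length_le (le_of_eq h.symm)) hu hc) hne

-- set(xs) has the same size as xs iff xs has no duplicates
theorem ofList_length_iff {α : Type} [BEq α] [LawfulBEq α] (l : List α) :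
    (PySem.Set.ofList l).length = l.length ↔ l.Nodup := by
  constructor
  · intro h
    have hsp := List.subperm_of_subset (PySem.Set.nodup_ofList l)
      (fun x hx => (PySem.Set.mem_ofList _ _).mp hx)
    have hperm := hsp.perm_of_length_le (le_of_eq h.symm)
    exact hperm.nodup_iff.mp (PySem.Set.nodup_ofList l)
  · intro h
    rw [PySem.Set.ofList_eq_self_of_nodup _ h]

theorem issubset_eq_decide (s t : List Int) :
    PySem.Set.issubset s t = decide (s ⊆ t) := by
  rcases h : PySem.Set.issubset s t with _ | _
  · symm
    simp only [decide_eq_false_iff_not]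
    intro hsub
    have := (PySem.Set.issubset_iff s t).mpr (fun x hx => hsub hx)
    simp [h] at this
  · symm
    simp only [decide_eq_true_eq]
    exact fun x hx => (PySem.Set.issubset_iff s t).mp h x hx

-- combinations of a duplicate-free list are pairwise distinct
theorem combos_nodup {α : Type} : ∀ (xs : List α), xs.Nodup →
    ∀ (r : Nat), (PySem.List.combinations xs r).Nodup := by
  intro xs
  induction xs with
  | nil =>
      intro _ r
      cases r with
      | zero => simp [PySem.List.combinations_zero]
      | succ r => simp [PySem.List.combinations_nil_succ]
  | cons x xs ih =>
      intro hnd r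
      have hx : x ∉ xs := (List.nodup_cons.mp hnd).1
      have hxs : xs.Nodup := (List.nodup_cons.mp hnd).2
      cases r with
      | zero => simp [PySem.List.combinations_zero]
      | succ r =>
          rw [PySem.List.combinations_cons_succ]
          refine List.Nodup.append ((ih hxs r).map ?_) (ih hxs (r + 1)) ?_
          · intro a b hab; injection hab
          · intro c hc1 hc2
            obtain ⟨d, hd, rfl⟩ := List.mem_map.mp hc1
            have := (PySem.List.mem_combinations_iff _ _ _).mp hc2
            exact hx (this.1.subset (List.mem_cons_self))

theorem mem_allC {n : Nat} {c : List Int} (hc : c ∈ allC n) :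
    c.Sublist (PySem.List.pyRange 0 (n : Int) 1) ∧ 1 ≤ c.length ∧ c.length ≤ n := by
  obtain ⟨i, hi, hci⟩ := List.mem_flatMap.mp hc
  obtain ⟨h1, h2⟩ := PySem.List.mem_pyRange_one.mp hi
  obtain ⟨hs, hl⟩ := (PySem.List.mem_combinations_iff _ _ _).mp hci
  refine ⟨hs, ?_, ?_⟩
  · omega
  · have := hs.length_le
    rw [PySem.List.length_pyRange_one] at this
    omega

theorem allC_inc {n : Nat} : ∀ c ∈ allC n, c.Pairwise (· < ·) := by
  intro c hc
  exact List.Pairwise.sublist (mem_allC hc).1 (PySem.List.pairwise_lt_pyRange_one 0 n)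

theorem allC_len (n : Nat) : (allC n).Pairwise (fun a b => a.length ≤ b.length) := by
  unfold allC
  rw [List.flatMap_def]
  refine List.pairwise_flatten.mpr ⟨?_, ?_⟩
  · intro bl hbl
    obtain ⟨i, _, rfl⟩ := List.mem_map.mp hbl
    refine List.pairwise_of_forall_mem_list ?_
    intro a ha b hb
    rw [PySem.List.length_of_mem_combinations ha,
        PySem.List.length_of_mem_combinations hb]
  · rw [List.pairwise_map]
    refine ((List.Pairwise.and_mem.mp (PySem.List.pairwise_lt_pyRange_one 1 (n + 1))).imp ?_)
    rintro i j ⟨hi, hj, hij⟩ x hx y hy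
    rw [PySem.List.length_of_mem_combinations hx,
        PySem.List.length_of_mem_combinations hy]
    have := PySem.List.mem_pyRange_one.mp hi
    omega

theorem allC_nodup (n : Nat) : (allC n).Nodup := by
  unfold allC
  rw [List.flatMap_def]
  refine List.nodup_flatten.mpr ⟨?_, ?_⟩
  · intro bl hbl
    obtain ⟨i, _, rfl⟩ := List.mem_map.mp hbl
    exact combos_nodup _ (PySem.List.nodup_pyRange_one 0 (n + 0)) _
  · rw [List.pairwise_map]
    refine ((List.Pairwise.and_mem.mp (PySem.List.pairwise_lt_pyRange_one 1 (n + 1))).imp ?_)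
    rintro i j ⟨hi, hj, hij⟩ x hx hx2
    have h1 := PySem.List.length_of_mem_combinations hx
    have h2 := PySem.List.length_of_mem_combinations hx2
    have := PySem.List.mem_pyRange_one.mp hi
    omega

-- the interleaved-prune fold computes exactly the minimal unique subsets
theorem foldl_stepP_eq (relation : List (List String)) (L : List (List Int))
    (hnd : L.Nodup) (hlen : L.Pairwise (fun a b => a.length ≤ b.length))
    (hinc : ∀ c ∈ L, c.Pairwise (· < ·)) :
    ∀ (R P : List (List Int)), L = P ++ R →
      R.foldl (stepP relation) (P.filter (fun c => MinL relation L c)) =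
        L.filter (fun c => MinL relation L c) := by
  intro R
  induction R with
  | nil => intro P hP; simp at hP; rw [hP]; rfl
  | cons c R ih =>
      intro P hP
      rw [List.foldl_cons]
      have hstep : stepP relation (P.filter (fun c => MinL relation L c)) c =
          (P ++ [c]).filter (fun c => MinL relation L c) := by
        have hcP : c ∉ P := by
          intro hmem
          have := List.nodup_append.mp (hP ▸ hnd)
          exact this.2.2 c hmem c (List.mem_cons_self) rfl
        have hcL : c ∈ L := by rw [hP]; exact List.mem_append_right _ (List.mem_cons_self)
        rw [List.filter_append]
        unfold stepP
        by_cases hA : (P.filter (fun c => MinL relation L c)).any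
            (fun t => decide (t ⊆ c)) = true
        · rw [if_pos hA]
          obtain ⟨t, ht, htc⟩ := List.any_eq_true.mp hA
          rw [List.mem_filter] at ht
          have htMin := (minL_iff relation L t).mp ht.2
          have htsub : t ⊆ c := of_decide_eq_true htc
          have hnMin : MinL relation L c = false := by
            rw [Bool.eq_false_iff]
            intro hM
            obtain ⟨-, hmin⟩ := (minL_iff relation L c).mp hM
            have htL : t ∈ L := by rw [hP]; exact List.mem_append_left _ ht.1
            have := hmin t htL htMin.1 htsub
            exact hcP (this ▸ ht.1)
          simp [hnMin]
        · rw [if_neg hA]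
          by_cases hU : (projL relation c).Nodup
          · have hMin : MinL relation L c = true := by
              refine (minL_iff relation L c).mpr ⟨hU, ?_⟩
              intro t htL htU htsub
              by_contra hne
              -- pick a minimal-length unique proper subset of c in L
              obtain ⟨m, hmL, ⟨hmU, hmsub, hmne⟩, hmmin⟩ :=
                exists_min_len (p := fun t => (projL relation t).Nodup ∧ t ⊆ c ∧ t ≠ c)
                  L ⟨t, htL, htU, htsub, hne⟩
              have hmlen : m.length < c.length :=
                subset_strict_length hmsub hmne (hinc m hmL) (hinc c hcL)
              have hmMin : MinL relation L m = true := by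
                refine (minL_iff relation L m).mpr ⟨hmU, ?_⟩
                intro u huL huU husub
                by_contra hune
                have hulen : u.length < m.length :=
                  subset_strict_length husub hune (hinc u huL) (hinc m hmL)
                have hup : (projL relation u).Nodup ∧ u ⊆ c ∧ u ≠ c := by
                  refine ⟨huU, husub.trans hmsub, ?_⟩
                  intro h
                  rw [h] at hulen
                  omega
                have := hmmin u huL hup
                omega
              have hmP : m ∈ P := by
                have : m ∈ P ++ c :: R := hP ▸ hmL
                rcases List.mem_append.mp this with h | h
                · exact h
                · rcases List.mem_cons.mp h with rfl | h
                  · omega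
                  · -- m comes after c, so c.length ≤ m.length: contradiction
                    have := List.pairwise_append.mp (hP ▸ hlen)
                    have h2 := (List.pairwise_cons.mp this.2.1).1 m h
                    omega
              exact hA (List.any_eq_true.mpr ⟨m, List.mem_filter.mpr
                ⟨hmP, hmMin⟩, decide_eq_true hmsub⟩)
            simp [hMin, hU]
          · have hnMin : MinL relation L c = false := by
              rw [Bool.eq_false_iff]
              intro hM
              exact hU ((minL_iff relation L c).mp hM).1
            simp [hnMin, hU]
      rw [hstep, ih (P ++ [c]) (by rw [hP, List.append_assoc]; rfl)]

theorem update_self (s : PySem.Set Int) (xs : List Int) (h : ∀ x ∈ xs, x ∈ s) :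
    PySem.Set.update s xs = s := by
  rw [PySem.Set.update_eq_append_filter]
  have hf : (PySem.Set.ofList xs).filter (fun y => !s.contains y) = [] := by
    rw [List.filter_eq_nil_iff]
    intro a ha
    have hmem := h a ((PySem.Set.mem_ofList _ _).mp ha)
    simp only [Bool.not_eq_true', ← Bool.not_eq_true]
    intro hcon
    exact hcon ((PySem.Set.contains_iff s a).mpr hmem)
  rw [hf, List.append_nil]

theorem dd0_items (n : Nat) :
    ((PySem.List.pyRange 0 (n : Int) 1).foldl
        (fun d i => d.insert i ([] : List String)) PySem.Dict.empty).items
      = (PySem.List.pyRange 0 (n : Int) 1).map (fun k => (k, ([] : List String))) := by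
  have h := PySem.Dict.items_foldl_insert_fresh (l := PySem.List.pyRange 0 (n : Int) 1)
      (k := fun a => a) (v := fun _ => ([] : List String)) (d := PySem.Dict.empty)
      (fun a _ => by simp [pysem]) (by simpa using PySem.List.nodup_pyRange_one 0 n)
  rw [show PySem.Dict.empty.items = ([] : List (Int × List String)) from rfl] at h
  simpa using h

theorem dd0_keys (n : Nat) :
    ((PySem.List.pyRange 0 (n : Int) 1).foldl
        (fun d i => d.insert i ([] : List String)) PySem.Dict.empty).keys
      = PySem.List.pyRange 0 (n : Int) 1 := by
  simp only [PySem.Dict.keys, dd0_items, List.map_map]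
  simp [Function.comp_def]

theorem dd0_getD (n : Nat) (k : Int) :
    ((PySem.List.pyRange 0 (n : Int) 1).foldl
        (fun d i => d.insert i ([] : List String)) PySem.Dict.empty).getD k [] = [] := by
  set dd0 := (PySem.List.pyRange 0 (n : Int) 1).foldl
      (fun d i => d.insert i ([] : List String)) PySem.Dict.empty with hdd0
  by_cases hc : dd0.contains k = true
  · have hk : k ∈ dd0.keys := (PySem.Dict.contains_iff_mem_keys _ _).mp hc
    rw [dd0_keys] at hk
    have hmem : (k, ([] : List String)) ∈ dd0.items := by
      rw [hdd0, dd0_items]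
      exact List.mem_map.mpr ⟨k, hk, rfl⟩
    exact PySem.Dict.getD_of_mem_items _ hmem
      (by rw [hdd0, dd0_keys]; exact PySem.List.nodup_pyRange_one 0 n) []
  · exact PySem.Dict.getD_of_not_contains _ _ (by simpa using hc)

theorem enum_filter_nil (c : Int) : ∀ (xs : List String) (s : Int), c < s →
    (PySem.List.enumerate xs s).filter (fun p => p.1 == c) = [] := by
  intro xs
  induction xs with
  | nil => intro s h; simp [pysem]
  | cons x xs ih =>
      intro s h
      rw [PySem.List.enumerate_cons, List.filter_cons]
      have hhead : (((s, x) : Int × String).1 == c) = false := by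
        simp only [beq_eq_false_iff_ne, ne_eq]
        omega
      simp only [hhead, Bool.false_eq_true, if_false]
      exact ih (s + 1) (by omega)

theorem enum_filter (row : List String) : ∀ (k : Nat) (s : Int), k < row.length →
    (PySem.List.enumerate row s).filter (fun p => p.1 == s + (k : Int))
      = [(s + (k : Int), row.getD k "")] := by
  induction row with
  | nil => intro k s h; simp at h
  | cons x xs ih =>
      intro k s h
      rw [PySem.List.enumerate_cons, List.filter_cons]
      cases k with
      | zero =>
          simp only [Nat.cast_zero, add_zero]
          have hhead : (((s, x) : Int × String).1 == s) = true := by simp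
          simp only [hhead, if_true]
          rw [enum_filter_nil s xs (s + 1) (by omega)]
          simp [List.getD]
      | succ k' =>
          have hhead : (((s, x) : Int × String).1 == s + ((k' + 1 : Nat) : Int)) = false := by
            simp only [beq_eq_false_iff_ne, ne_eq]
            push_cast
            omega
          simp only [hhead, Bool.false_eq_true, if_false]
          have harith : s + ((k' + 1 : Nat) : Int) = (s + 1) + (k' : Int) := by push_cast; ring
          rw [harith, ih k' (s + 1) (by simpa using h)]
          simp [List.getD]

theorem row_keys (n : Nat) (row : List String) (d : PySem.Dict Int (List String))
    (hk : d.keys = PySem.List.pyRange 0 (n : Int) 1) (hr : row.length ≤ n) :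
    ((PySem.List.enumerate row 0).foldl
        (fun d p => d.modify p.1 [] (fun l => l ++ [p.2])) d).keys
      = PySem.List.pyRange 0 (n : Int) 1 := by
  have h := PySem.Dict.keys_foldl_modify_key (PySem.List.enumerate row 0) (fun p => p.1)
      ([] : List String) (fun _ p => fun l => l ++ [p.2]) d
  simp only [] at h
  rw [h, PySem.List.map_fst_enumerate, hk]
  refine update_self _ _ ?_
  intro x hx
  rw [PySem.List.mem_pyRange_one] at hx ⊢
  omega

theorem row_getD (row : List String) (d : PySem.Dict Int (List String)) (k : Nat) :
    ((PySem.List.enumerate row 0).foldl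
        (fun d p => d.modify p.1 [] (fun l => l ++ [p.2])) d).getD (k : Int) []
      = d.getD (k : Int) [] ++ (if k < row.length then [row.getD k ""] else []) := by
  rw [PySem.Dict.getD_foldl_modify_append (PySem.List.enumerate row 0) d (k : Int)]
  by_cases hk : k < row.length
  · have h0 : (0 : Int) + (k : Int) = (k : Int) := by ring
    rw [← h0, enum_filter row k 0 hk]
    simp [hk]
  · have hout : ∀ (xs : List String) (s c : Int), s + xs.length ≤ c →
        (PySem.List.enumerate xs s).filter (fun p => p.1 == c) = [] := by
      intro xs
      induction xs with
      | nil => intro s c h; simp [pysem]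
      | cons x xs ih =>
          intro s c h
          rw [PySem.List.enumerate_cons, List.filter_cons]
          have hhead : (((s, x) : Int × String).1 == c) = false := by
            simp only [beq_eq_false_iff_ne, ne_eq]
            simp only [List.length_cons] at h
            omega
          simp only [hhead, Bool.false_eq_true, if_false]
          refine ih (s + 1) c ?_
          simp only [List.length_cons] at h
          push_cast at h
          omega
    rw [hout row 0 (k : Int) (by omega)]
    simp [hk]

theorem colF_cons (r : List String) (rs : List (List String)) (k : Nat) :
    colF (r :: rs) k = (if k < r.length then [r.getD k ""] else []) ++ colF rs k := by
  by_cases h : k < r.length <;> simp [colF, h]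

theorem build_spec (n : Nat) : ∀ (rs : List (List String)) (d : PySem.Dict Int (List String)),
    d.keys = PySem.List.pyRange 0 (n : Int) 1 → (∀ r ∈ rs, r.length ≤ n) →
    (rs.foldl (fun d row => (PySem.List.enumerate row 0).foldl
        (fun d p => d.modify p.1 [] (fun l => l ++ [p.2])) d) d).keys
        = PySem.List.pyRange 0 (n : Int) 1 ∧
    ∀ k : Nat,
      (rs.foldl (fun d row => (PySem.List.enumerate row 0).foldl
          (fun d p => d.modify p.1 [] (fun l => l ++ [p.2])) d) d).getD (k : Int) []
        = d.getD (k : Int) [] ++ colF rs k := by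
  intro rs
  induction rs with
  | nil => intro d hk _; exact ⟨hk, fun k => by simp [colF]⟩
  | cons r rs ih =>
      intro d hk hlen
      rw [List.foldl_cons]
      have hr : r.length ≤ n := hlen r (List.mem_cons_self)
      obtain ⟨ihk, ihg⟩ := ih _ (row_keys n r d hk hr) (fun x hx => hlen x (List.mem_cons_of_mem _ hx))
      refine ⟨ihk, ?_⟩
      intro k
      rw [ihg k, row_getD r d k, colF_cons, List.append_assoc]

theorem buildDD_keys (relation : List (List String)) (h : Pre_solution relation) :
    (buildDD relation).keys = PySem.List.pyRange 0 (relation.headI.length : Int) 1 := by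
  simp only [buildDD]
  exact (build_spec relation.headI.length relation _ (dd0_keys _) h.2).1

theorem buildDD_getD (relation : List (List String)) (h : Pre_solution relation) (k : Nat) :
    (buildDD relation).getD (k : Int) [] = colF relation k := by
  simp only [buildDD]
  rw [(build_spec relation.headI.length relation _ (dd0_keys _) h.2).2 k,
      dd0_getD, List.nil_append]

theorem buildDD_size (relation : List (List String)) (h : Pre_solution relation) :
    (buildDD relation).size = relation.headI.length := by
  have h1 : (buildDD relation).size = (buildDD relation).keys.length := by
    simp [PySem.Dict.size, PySem.Dict.keys]
  rw [h1, buildDD_keys relation h, PySem.List.length_pyRange_one]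
  omega

theorem sortedSet_iff (l : List (List (List String))) :
    (PySem.List.sorted l (fun x => x) false
      = PySem.List.sorted (PySem.Set.ofList l) (fun x => x) false) ↔ l.Nodup := by
  rw [show (fun (a b : List (List String)) => a.decidableLT b)
        = (LinearOrder.toDecidableLT : DecidableLT (List (List String))) from
      funext fun a => funext fun b => Subsingleton.elim _ _]
  rw [PySem.List.sorted_id_eq_sorted_id_iff_perm]
  constructor
  · intro h
    exact h.nodup_iff.mpr (PySem.Set.nodup_ofList l)
  · intro h
    rw [PySem.Set.ofList_eq_self_of_nodup _ h]

theorem condA_iff (relation : List (List String)) (n : Nat) (dd : PySem.Dict Int (List String))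
    (hcol : ∀ k : Nat, dd.getD (k : Int) [] = colF relation k)
    (j : List Int) (hmem : ∀ k ∈ j, 0 ≤ k ∧ k < (n : Int)) :
    (PySem.List.sorted ((zipN (j.map (fun k => dd.getD k []))).map (fun r => [r])) (fun x => x) false
      = PySem.List.sorted (PySem.Set.ofList ((zipN (j.map (fun k => dd.getD k []))).map (fun r => [r]))) (fun x => x) false)
      ↔ (projL relation j).Nodup := by
  have htup : j.map (fun k => dd.getD k []) = j.map (fun k => colF relation k.toNat) := by
    apply List.map_congr_left
    intro k hk
    obtain ⟨h0, _⟩ := hmem k hk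
    have hcast : ((k.toNat : Nat) : Int) = k := Int.toNat_of_nonneg h0
    rw [← hcast, hcol k.toNat, Int.toNat_natCast]
  rw [htup, show zipN (j.map (fun k => colF relation k.toNat)) = projL relation j from rfl,
      sortedSet_iff]
  exact List.nodup_map_iff (fun a b hab => by injection hab)

theorem equal_eq_iff (s t : List Int) (hs : s.Pairwise (· < ·)) (ht : t.Pairwise (· < ·)) :
    PySem.Set.equal s t = true ↔ s = t := by
  constructor
  · intro h
    exact eq_of_perm_inc ((List.perm_ext_iff_of_nodup (nodup_of_inc hs) (nodup_of_inc ht)).mpr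
      ((PySem.Set.equal_iff s t).mp h)) hs ht
  · rintro rfl
    exact (PySem.Set.equal_iff s s).mpr (fun x => Iff.rfl)

theorem strict_iff (s t : List Int) (hs : s.Pairwise (· < ·)) (ht : t.Pairwise (· < ·)) :
    (PySem.Set.issuperset s t && !(PySem.Set.equal s t)) = true ↔ (t ⊆ s ∧ t ≠ s) := by
  rw [Bool.and_eq_true, Bool.not_eq_true']
  constructor
  · rintro ⟨h1, h2⟩
    refine ⟨fun x hx => (PySem.Set.issuperset_iff s t).mp h1 x hx, ?_⟩
    intro hts
    rw [(equal_eq_iff s t hs ht).mpr hts.symm] at h2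
    cases h2
  · rintro ⟨h1, h2⟩
    refine ⟨(PySem.Set.issuperset_iff s t).mpr (fun x hx => h1 hx), ?_⟩
    rcases hq : PySem.Set.equal s t with _ | _
    · rfl
    · exact absurd ((equal_eq_iff s t hs ht).mp hq).symm h2

theorem final_pred (relation : List (List String)) (n : Nat) (c : List Int) (hc : c ∈ allC n) :
    ((!(((allC n).filter (fun j => decide ((projL relation j).Nodup))).any
        (fun other => PySem.Set.issuperset c other && !(PySem.Set.equal c other))))
      && decide ((projL relation c).Nodup))
      = MinL relation (allC n) c := by
  set A := ((allC n).filter (fun j => decide ((projL relation j).Nodup))).any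
      (fun other => PySem.Set.issuperset c other && !(PySem.Set.equal c other)) with hA
  have hany : A = true ↔ ∃ t ∈ allC n, (projL relation t).Nodup ∧ t ⊆ c ∧ t ≠ c := by
    rw [hA, List.any_eq_true]
    constructor
    · rintro ⟨t, htm, htp⟩
      rw [List.mem_filter] at htm
      have hst := (strict_iff c t (allC_inc c hc) (allC_inc t htm.1)).mp htp
      exact ⟨t, htm.1, of_decide_eq_true htm.2, hst.1, hst.2⟩
    · rintro ⟨t, htm, htU, htsub, htne⟩
      exact ⟨t, List.mem_filter.mpr ⟨htm, decide_eq_true htU⟩,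
        (strict_iff c t (allC_inc c hc) (allC_inc t htm)).mpr ⟨htsub, htne⟩⟩
  rw [Bool.eq_iff_iff]
  simp only [Bool.and_eq_true, Bool.not_eq_true', decide_eq_true_eq, minL_iff]
  constructor
  · rintro ⟨hnot, hU⟩
    refine ⟨hU, ?_⟩
    intro t ht htU htsub
    by_contra hne
    exact absurd (hany.mpr ⟨t, ht, htU, htsub, hne⟩) (by simp [hnot])
  · rintro ⟨hU, hmin⟩
    refine ⟨?_, hU⟩
    rcases hq : A with _ | _
    · rfl
    · obtain ⟨t, htm, htU2, htsub, htne⟩ := hany.mp hq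
      exact absurd (hmin t htm htU2 htsub) htne

theorem solution_A_eq (relation : List (List String)) (h : Pre_solution relation) :
    solution relation =
      ((allC relation.headI.length).filter
        (fun c => MinL relation (allC relation.headI.length) c)).length := by
  simp only [solution]
  simp only [buildDD_size relation h, buildDD_keys relation h]
  have hTest : List.foldl
      (fun test i => List.foldl
        (fun test j =>
          if (PySem.List.sorted
                (List.map (fun r => [r]) (zipN (List.map (fun k => (buildDD relation).getD k []) j)))
                (fun x => x) false)
              = PySem.List.sorted
                (PySem.Set.ofList
                  (List.map (fun r => [r]) (zipN (List.map (fun k => (buildDD relation).getD k []) j))))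
                (fun x => x) false
          then test ++ [j] else test)
        test (PySem.List.combinations (PySem.List.pyRange 0 (relation.headI.length : Int) 1) i.toNat))
      [] (PySem.List.pyRange 1 ((relation.headI.length : Int) + 1) 1)
    = (allC relation.headI.length).filter (fun j => decide ((projL relation j).Nodup)) := by
    rw [← List.foldl_flatMap]
    rw [show ((PySem.List.pyRange 1 ((relation.headI.length : Int) + 1) 1).flatMap
        (fun i => PySem.List.combinations (PySem.List.pyRange 0 (relation.headI.length : Int) 1) i.toNat))
        = allC relation.headI.length from rfl]
    rw [PySem.List.foldl_congr_mem _ _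
        (g := fun test j => if (projL relation j).Nodup then test ++ [j] else test) _ ?_]
    · rw [PySem.List.foldl_append_ite_eq_filter (p := fun j => (projL relation j).Nodup)]
      rfl
    · intro acc j hj
      have hmemj : ∀ k ∈ j, 0 ≤ k ∧ k < (relation.headI.length : Int) := fun k hk =>
        PySem.List.mem_pyRange_one.mp ((mem_allC hj).1.subset hk)
      exact if_congr
        (condA_iff relation relation.headI.length (buildDD relation)
          (fun k => buildDD_getD relation h k) j hmemj) rfl rfl
  rw [hTest]
  have hSets : ((allC relation.headI.length).filter
        (fun j => decide ((projL relation j).Nodup))).map (fun sub => PySem.Set.ofList sub)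
      = (allC relation.headI.length).filter (fun j => decide ((projL relation j).Nodup)) := by
    rw [List.map_congr_left (g := fun x => x) ?_, List.map_id']
    intro x hx
    exact PySem.Set.ofList_eq_self_of_nodup _
      (nodup_of_inc (allC_inc x (List.mem_of_mem_filter hx)))
  rw [hSets]
  rw [PySem.List.foldl_append_if_eq_filter
      (p := fun s => !(((allC relation.headI.length).filter
          (fun j => decide ((projL relation j).Nodup))).any
        (fun other => PySem.Set.issuperset s other && !(PySem.Set.equal s other))))]
  rw [List.nil_append, List.filter_filter]
  congr 1
  apply congrArg
  apply List.filter_congr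
  intro c hc
  exact final_pred relation relation.headI.length c hc

theorem solution_B_eq (relation : List (List String)) (_h : Pre_solution relation) :
    solution_alt relation =
      ((allC relation.headI.length).filter
        (fun c => MinL relation (allC relation.headI.length) c)).length := by
  simp only [solution_alt]
  rw [← List.foldl_flatMap]
  rw [show ((PySem.List.pyRange 1 ((relation.headI.length : Int) + 1) 1).flatMap
      (fun i => PySem.List.combinations (PySem.List.pyRange 0 (relation.headI.length : Int) 1) i.toNat))
      = allC relation.headI.length from rfl]
  rw [PySem.List.foldl_congr_mem (g := stepP relation) _ _ _ ?_]
  · rw [show ([] : List (PySem.Set Int)) =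
        ([] : List (List Int)).filter (fun c => MinL relation (allC relation.headI.length) c) from rfl]
    rw [foldl_stepP_eq relation (allC relation.headI.length) (allC_nodup _) (allC_len _) allC_inc
        (allC relation.headI.length) [] (by rw [List.nil_append])]
  · intro acc c hc
    have hinc := allC_inc c hc
    have hofl : PySem.Set.ofList c = c := PySem.Set.ofList_eq_self_of_nodup _ (nodup_of_inc hinc)
    have hmemc : ∀ k ∈ c, 0 ≤ k ∧ k < (relation.headI.length : Int) := fun k hk =>
      PySem.List.mem_pyRange_one.mp ((mem_allC hc).1.subset hk)
    have hcols : c.map (fun k => PySem.List.pyGetD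
          ((PySem.List.pyRange 0 (relation.headI.length : Int) 1).map
            (fun k => (relation.filter (fun r => decide (k < PySem.List.len r))).map
              (fun r => PySem.List.pyGetD r k ""))) k [])
        = c.map (fun k => colF relation k.toNat) := by
      apply List.map_congr_left
      intro k hk
      obtain ⟨h0, hn2⟩ := hmemc k hk
      rw [PySem.List.pyGetD_map_pyRange_of_nonneg _ _ _ _ h0 hn2]
      have hcast : ((k.toNat : Nat) : Int) = k := Int.toNat_of_nonneg h0
      rw [← hcast]
      have hfil : relation.filter (fun r => decide (((k.toNat : Nat) : Int) < PySem.List.len r))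
          = relation.filter (fun r => decide (k.toNat < r.length)) := by
        apply List.filter_congr
        intro r _
        simp only [PySem.List.len_eq]
        exact decide_eq_decide.mpr (by exact_mod_cast Iff.rfl)
      rw [hfil]
      unfold colF
      apply List.map_congr_left
      intro r _
      rw [PySem.List.pyGetD_natCast, Int.toNat_natCast]
    simp only [hofl, issubset_eq_decide, hcols, stepP]
    rcases h1 : acc.any fun t => decide (t ⊆ c) with _ | _
    · simp only [Bool.false_eq_true, if_false]
      exact if_congr (ofList_length_iff _) rfl rfl
    · simp

-- ===== VERDICT (by name: the statement is the Claim_ definition above) =====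
theorem solution_spec : Claim_equal_solution := by
  intro relation _ hpre
  unfold Spec_solution
  rw [solution_A_eq relation hpre, solution_B_eq relation hpre]
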